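-- pv_equiv track=rewrite | github.com/leehxein/Algorithm | 프로그래머스/0/120814. 피자 나눠 먹기 （1）/피자 나눠 먹기 （1）.py | solution
-- ===== SOURCE A (Python) =====
-- def solution(n):
--     pizza_cnt = 1
--     while True:
--         if 7 * pizza_cnt >= n:
--             break
--         else:
--             pizza_cnt += 1
--     return pizza_cnt
-- ===== SOURCE B (Python) =====
-- def solution(n):
--     return max(1, (n + 6) // 7)
-- ===== Notes on version B (the rewrite author's own statement) =====
-- stated objective: faster
-- what changed: Replaced the counting loop with a constant-time ceiling division, max(1, (n+6)//7).
import Mathlib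
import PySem

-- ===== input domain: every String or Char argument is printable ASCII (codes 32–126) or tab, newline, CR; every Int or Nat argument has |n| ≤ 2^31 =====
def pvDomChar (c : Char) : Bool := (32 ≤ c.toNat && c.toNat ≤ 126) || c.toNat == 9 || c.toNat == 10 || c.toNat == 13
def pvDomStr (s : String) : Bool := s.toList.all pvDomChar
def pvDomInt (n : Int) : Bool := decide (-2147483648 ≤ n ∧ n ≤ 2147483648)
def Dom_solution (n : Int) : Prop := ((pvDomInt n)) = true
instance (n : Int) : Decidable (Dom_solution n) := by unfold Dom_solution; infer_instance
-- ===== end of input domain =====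

-- B replaces A's counting loop with constant-time ceiling division: faster (O(1) vs O(n)).

-- ===== PORT A =====
-- A's 'while True' loop: count pizza_cnt up from 1 until 7 * pizza_cnt ≥ n.
def solutionLoop (n c : Int) : Int :=
  if 7 * c ≥ n then c else solutionLoop n (c + 1)
termination_by (n - 7 * c).toNat
decreasing_by omega

def solution (n : Int) : Int := solutionLoop n 1

-- ===== PORT B =====
def solution_alt (n : Int) : Int := max 1 (PySem.Int.floordiv (n + 6) 7)

-- ===== PRECONDITION & SPEC =====
def Spec_solution (n : Int) (out : Int) : Prop := out = solution_alt n
instance (n : Int) (out : Int) : Decidable (Spec_solution n out) := by unfold Spec_solution; infer_instance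

-- ===== CLAIM (what is proved, stated in full; the proofs are below) =====
def Claim_equal_solution : Prop := ∀ (n : Int), Dom_solution n → Spec_solution n (solution n)

-- ===== LEMMAS AND PROOFS =====
theorem solutionLoop_eq (n c : Int) :
    solutionLoop n c = max c (PySem.Int.floordiv (n + 6) 7) := by
  rw [solutionLoop]
  have hdiv := PySem.Int.floordiv_eq_iff_of_pos (a := n + 6) (b := 7)
      (q := PySem.Int.floordiv (n + 6) 7) (by omega)
  have h7 : PySem.Int.floordiv (n + 6) 7 * 7 ≤ n + 6 ∧
      n + 6 < (PySem.Int.floordiv (n + 6) 7 + 1) * 7 := hdiv.mp rfl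
  split
  · omega
  · rw [solutionLoop_eq n (c + 1)]
    omega
termination_by (n - 7 * c).toNat
decreasing_by omega

-- ===== VERDICT (by name: the statement is the Claim_ definition above) =====
theorem solution_spec : Claim_equal_solution := by
  intro n _
  unfold Spec_solution solution solution_alt
  rw [solutionLoop_eq]
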